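-- pv_equiv track=rewrite | github.com/sincereonly0601/my-frieren | adopter_questionnaire.py | format_adopter_merged_deltas_zh
-- ===== SOURCE A (Python) =====
-- from typing import Final
--
-- _STAT_PRIORITY: Final[tuple[str, ...]] = (
--     "int_stat",
--     "str_stat",
--     "fth_stat",
--     "pragmatic",
--     "social",
-- )
--
-- STAT_LABEL_ADOPTER_ZH: Final[dict[str, str]] = {
--     "int_stat": "智力",
--     "str_stat": "力量",
--     "fth_stat": "信仰",
--     "pragmatic": "務實",
--     "social": "社交",
--     "truth_seek": "真理探求",
-- }
--
-- def format_adopter_merged_deltas_zh(merged: dict[str, int]) -> str: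
--     """
--     將合併增量化為「智力+2  力量+1」式單行摘要（兩半形空格分隔）。
--
--     Args:
--         merged: 合併增量。
--
--     Returns:
--         以兩半形空格連接之字串；空則為「（無數值變化）」。
--     """
--     if not merged:
--         return "（無數值變化）"
--     bits = [
--         f"{STAT_LABEL_ADOPTER_ZH.get(k, k)}{'+' if v > 0 else ''}{v}"
--         for k, v in sorted(merged.items(), key=lambda kv: (_STAT_PRIORITY.index(kv[0]) if kv[0] in _STAT_PRIORITY else 99, kv[0]))
--         if v != 0
--     ]
--     return "  ".join(bits) if bits else "（無數值變化）"
-- ===== SOURCE B (Python) =====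
-- from typing import Final
--
-- _STAT_PRIORITY: Final[tuple[str, ...]] = (
--     "int_stat",
--     "str_stat",
--     "fth_stat",
--     "pragmatic",
--     "social",
-- )
--
-- STAT_LABEL_ADOPTER_ZH: Final[dict[str, str]] = {
--     "int_stat": "智力",
--     "str_stat": "力量",
--     "fth_stat": "信仰",
--     "pragmatic": "務實",
--     "social": "社交",
--     "truth_seek": "真理探求",
-- }
--
--
-- def _bit(k: str, v: int) -> str:
--     return f"{STAT_LABEL_ADOPTER_ZH.get(k, k)}{'+' if v > 0 else ''}{v}"
--
--
-- def format_adopter_merged_deltas_zh(merged: dict[str, int]) -> str: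
--     bits = []
--     for k in _STAT_PRIORITY:
--         if k in merged and merged[k] != 0:
--             bits.append(_bit(k, merged[k]))
--     for k in sorted(k for k in merged if k not in _STAT_PRIORITY):
--         if merged[k] != 0:
--             bits.append(_bit(k, merged[k]))
--     return "  ".join(bits) if bits else "（無數值變化）"
-- ===== Notes on version B (the rewrite author's own statement) =====
-- stated objective: alternative
-- what changed: A sorts all dict items once with a (priority-index, key) tuple key and then filters/formats; B never builds tuple keys at all: it scans _STAT_PRIORITY in order emitting bits for present nonzero stats, then appends the bits of the remaining keys sorted alphabetically.
import Mathlib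
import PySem

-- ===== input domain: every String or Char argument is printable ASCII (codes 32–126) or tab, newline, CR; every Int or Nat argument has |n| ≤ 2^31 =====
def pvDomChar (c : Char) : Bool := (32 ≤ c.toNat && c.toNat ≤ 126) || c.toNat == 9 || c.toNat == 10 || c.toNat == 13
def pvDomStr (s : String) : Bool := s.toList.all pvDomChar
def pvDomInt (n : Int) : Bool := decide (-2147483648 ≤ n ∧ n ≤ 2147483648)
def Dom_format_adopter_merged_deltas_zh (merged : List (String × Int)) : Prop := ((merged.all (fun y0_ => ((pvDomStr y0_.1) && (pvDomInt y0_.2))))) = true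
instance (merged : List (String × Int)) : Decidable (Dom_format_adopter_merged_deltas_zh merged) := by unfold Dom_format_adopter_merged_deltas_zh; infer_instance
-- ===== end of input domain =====

-- B replaces A's single sort of all items under a (priority-index, key) tuple key by a scan over
-- _STAT_PRIORITY in order followed by an alphabetically sorted pass over the leftover keys.

-- module constants shared by both Pythons (same-module context, not part of either algorithm)
def pvStatPriority : List String := ["int_stat", "str_stat", "fth_stat", "pragmatic", "social"]

def pvStatLabel : PySem.Dict String String := PySem.Dict.ofList
  [("int_stat", "智力"), ("str_stat", "力量"), ("fth_stat", "信仰"),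
   ("pragmatic", "務實"), ("social", "社交"), ("truth_seek", "真理探求")]

-- f"{STAT_LABEL_ADOPTER_ZH.get(k, k)}{'+' if v > 0 else ''}{v}"  (identical f-string in A and B)
def pvBit (k : String) (v : Int) : String :=
  (pvStatLabel.getD k k) ++ (if v > 0 then "+" else "") ++ PySem.Int.toStr v

-- ===== PORT A =====
-- (_STAT_PRIORITY.index(kv[0]) if kv[0] in _STAT_PRIORITY else 99): index? is some exactly when
-- the key occurs in the tuple, so the membership test and the .index call are this one match
def pvIdxKey (k : String) : Int :=
  match PySem.List.index? pvStatPriority k with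
  | some i => (i : Int)
  | none => 99

def format_adopter_merged_deltas_zh (merged : List (String × Int)) : String :=
  let d := PySem.Dict.ofList merged      -- the Python parameter is a dict
  if d.items.isEmpty then "（無數值變化）"
  else
    let bits := (PySem.List.sorted2 d.items (fun kv => pvIdxKey kv.1) (fun kv => kv.1)).filterMap
      (fun kv => if kv.2 ≠ 0 then some (pvBit kv.1 kv.2) else none)
    if bits.isEmpty then "（無數值變化）" else PySem.Str.join "  " bits

-- ===== PORT B =====
def format_adopter_merged_deltas_zh_alt (merged : List (String × Int)) : String :=
  let d := PySem.Dict.ofList merged      -- the Python parameter is a dict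
  -- for k in _STAT_PRIORITY: if k in merged and merged[k] != 0: bits.append(_bit(k, merged[k]))
  let priBits := pvStatPriority.filterMap (fun k =>
    match d.get? k with
    | some v => if v ≠ 0 then some (pvBit k v) else none
    | none => none)
  -- for k in sorted(k for k in merged if k not in _STAT_PRIORITY): if merged[k] != 0: append
  let restKeys := PySem.List.sorted (d.keys.filter (fun k => !pvStatPriority.contains k)) (fun k => k)
  let restBits := restKeys.filterMap (fun k =>
    let v := d.getD k 0
    if v ≠ 0 then some (pvBit k v) else none)
  let bits := priBits ++ restBits
  if bits.isEmpty then "（無數值變化）" else PySem.Str.join "  " bits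

-- ===== PRECONDITION & SPEC =====
def Spec_format_adopter_merged_deltas_zh (merged : List (String × Int)) (out : String) : Prop := out = format_adopter_merged_deltas_zh_alt merged
instance (merged : List (String × Int)) (out : String) : Decidable (Spec_format_adopter_merged_deltas_zh merged out) := by unfold Spec_format_adopter_merged_deltas_zh; infer_instance

-- ===== CLAIM (what is proved, stated in full; the proofs are below) =====
def Claim_equal_format_adopter_merged_deltas_zh : Prop := ∀ (merged : List (String × Int)), Dom_format_adopter_merged_deltas_zh merged → Spec_format_adopter_merged_deltas_zh merged (format_adopter_merged_deltas_zh merged)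

-- ===== LEMMAS AND PROOFS =====

theorem pvIdxKey_lt_99 {k : String} (h : k ∈ pvStatPriority) : pvIdxKey k < 99 := by
  fin_cases h <;> decide

theorem pvIdxKey_eq_99 {k : String} (h : ¬ k ∈ pvStatPriority) : pvIdxKey k = 99 := by
  simp [pvIdxKey, PySem.List.index?, List.idxOf?_eq_none_iff.2 h]

-- A's tuple sort key is the lexicographic order on (index, key)
theorem pv_sorted2_eq_sorted_lex {α : Type} (xs : List α) (k1 : α → Int) (k2 : α → String) :
    PySem.List.sorted2 xs k1 k2 = PySem.List.sorted xs (fun x => toLex (k1 x, k2 x)) := by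
  have hf : (fun a b => decide (k1 a < k1 b) || !decide (k1 b < k1 a) && decide (k2 a < k2 b))
      = (fun a b : α => decide (toLex (k1 a, k2 a) < toLex (k1 b, k2 b))) := by
    funext a b
    simp only [Prod.Lex.toLex_lt_toLex]
    rcases lt_trichotomy (k1 a) (k1 b) with h | h | h
    · simp [h, not_lt.2 (le_of_lt h)]
    · simp [h]
    · simp [h.ne', not_lt.2 (le_of_lt h)]
      intro h2
      exact absurd h2 (not_le.2 h)
  simp only [PySem.List.sorted2, PySem.List.sorted, if_neg (by decide : ¬ (false = true)), hf]

-- the key fact: A's sorted item list IS B's priority scan followed by the sorted leftovers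
theorem pv_sorted_items (d : PySem.Dict String Int) (hnd : d.keys.Nodup) :
    PySem.List.sorted2 d.items (fun kv => pvIdxKey kv.1) (fun kv => kv.1) =
      pvStatPriority.filterMap (fun k => (d.get? k).map (fun v => (k, v))) ++
      (PySem.List.sorted (d.keys.filter (fun k => !pvStatPriority.contains k)) (fun k => k)).map
        (fun k => (k, d.getD k 0)) := by
  have hmem_pri : ∀ x : String × Int,
      x ∈ pvStatPriority.filterMap (fun k => (d.get? k).map (fun v => (k, v))) ↔
        x.1 ∈ pvStatPriority ∧ d.get? x.1 = some x.2 := by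
    intro x
    simp only [List.mem_filterMap, Option.map_eq_some_iff]
    constructor
    · rintro ⟨k, hk, v, hv, rfl⟩
      exact ⟨hk, hv⟩
    · rintro ⟨hk, hv⟩
      exact ⟨x.1, hk, x.2, hv, rfl⟩
  rw [pv_sorted2_eq_sorted_lex]
  apply PySem.List.sorted_eq_of_perm_of_pairwise_lt
  · -- permutation: priority pairs are the items with priority keys, the rest are the others
    have hnd_items : d.items.Nodup := List.Nodup.of_map _ hnd
    have hperm_rest :
        ((PySem.List.sorted (d.keys.filter (fun k => !pvStatPriority.contains k)) (fun k => k)).map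
          (fun k => (k, d.getD k 0))).Perm
          (d.items.filter (fun kv => !pvStatPriority.contains kv.1)) := by
      conv_rhs => rw [PySem.Dict.items_eq_map_keys d hnd 0, List.filter_map]
      exact (PySem.List.sorted_perm _ _ _).map _
    have hperm_pri :
        (pvStatPriority.filterMap (fun k => (d.get? k).map (fun v => (k, v)))).Perm
          (d.items.filter (fun kv => pvStatPriority.contains kv.1)) := by
      have hnd_pri : (pvStatPriority.filterMap (fun k => (d.get? k).map (fun v => (k, v)))).Nodup := by
        apply List.Nodup.filterMap
        · intro a a' b hb hb'
          rcases Option.map_eq_some_iff.1 hb with ⟨v, -, rfl⟩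
          rcases Option.map_eq_some_iff.1 hb' with ⟨v', -, h⟩
          exact (congrArg Prod.fst h).symm
        · decide
      rw [List.perm_ext_iff_of_nodup hnd_pri (hnd_items.filter _)]
      intro x
      rw [hmem_pri, List.mem_filter,
        PySem.Dict.get?_eq_some_iff_mem_items d x.1 x.2 hnd]
      simp [and_comm]
    exact (hperm_pri.append hperm_rest).trans (List.filter_append_perm _ _)
  · -- the concatenation is strictly increasing under the lex key
    rw [List.pairwise_append]
    refine ⟨?_, ?_, ?_⟩
    · rw [List.pairwise_filterMap]
      have hP : pvStatPriority.Pairwise (fun p q => toLex (pvIdxKey p, p) < toLex (pvIdxKey q, q)) := by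
        decide
      refine hP.imp_of_mem ?_
      rintro p q - - hpq b hb b' hb'
      rcases Option.map_eq_some_iff.1 hb with ⟨v, -, rfl⟩
      rcases Option.map_eq_some_iff.1 hb' with ⟨v', -, rfl⟩
      exact hpq
    · rw [List.pairwise_map]
      have h1 := PySem.List.sorted_pairwise (d.keys.filter (fun k => !pvStatPriority.contains k))
        (fun k => k)
      have hndr : (PySem.List.sorted (d.keys.filter (fun k => !pvStatPriority.contains k))
          (fun k => k)).Nodup :=
        ((PySem.List.sorted_perm _ _ _).nodup_iff).2 (hnd.filter _)
      refine (h1.and hndr).imp_of_mem ?_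
      intro a b ha hb hab
      have ha' : ¬ a ∈ pvStatPriority := by
        have := (List.mem_filter.1 ((PySem.List.mem_sorted _ _ _ _).1 ha)).2
        simpa using this
      have hb' : ¬ b ∈ pvStatPriority := by
        have := (List.mem_filter.1 ((PySem.List.mem_sorted _ _ _ _).1 hb)).2
        simpa using this
      rw [pvIdxKey_eq_99 ha', pvIdxKey_eq_99 hb']
      exact Prod.Lex.right _ (lt_of_le_of_ne hab.1 hab.2)
    · intro x hx y hy
      have hx1 : x.1 ∈ pvStatPriority := ((hmem_pri x).1 hx).1
      have hy1 : ¬ y.1 ∈ pvStatPriority := by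
        rcases List.mem_map.1 hy with ⟨k, hk, rfl⟩
        have := (List.mem_filter.1 ((PySem.List.mem_sorted _ _ _ _).1 hk)).2
        simpa using this
      rw [Prod.Lex.toLex_lt_toLex]
      left
      rw [pvIdxKey_eq_99 hy1]
      exact pvIdxKey_lt_99 hx1

theorem pv_main (merged : List (String × Int)) :
    format_adopter_merged_deltas_zh merged = format_adopter_merged_deltas_zh_alt merged := by
  unfold format_adopter_merged_deltas_zh format_adopter_merged_deltas_zh_alt
  have hnd := PySem.Dict.nodup_keys_ofList merged
  set d := PySem.Dict.ofList merged with hd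
  have hbits :
      (PySem.List.sorted2 d.items (fun kv => pvIdxKey kv.1) (fun kv => kv.1)).filterMap
        (fun kv => if kv.2 ≠ 0 then some (pvBit kv.1 kv.2) else none) =
      (pvStatPriority.filterMap (fun k =>
        match d.get? k with
        | some v => if v ≠ 0 then some (pvBit k v) else none
        | none => none)) ++
      ((PySem.List.sorted (d.keys.filter (fun k => !pvStatPriority.contains k)) (fun k => k)).filterMap
        (fun k => let v := d.getD k 0; if v ≠ 0 then some (pvBit k v) else none)) := by
    rw [pv_sorted_items d hnd, List.filterMap_append, List.filterMap_filterMap, List.filterMap_map]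
    congr 1
    refine congrArg (fun f => List.filterMap f pvStatPriority) ?_
    funext k
    cases d.get? k <;> rfl
  by_cases hemp : d.items.isEmpty
  · have hkeys : d.keys = [] := by
      simp only [PySem.Dict.keys]
      rw [List.isEmpty_iff.1 hemp]
      rfl
    have h1 : ∀ k, d.get? k = none := by
      intro k
      rw [PySem.Dict.get?_eq_none_iff_not_mem_keys, hkeys]
      simp
    simp [hemp, h1, hkeys, PySem.List.sorted]
  · rw [if_neg (by simpa using hemp), hbits]

-- ===== VERDICT (by name: the statement is the Claim_ definition above) =====
theorem format_adopter_merged_deltas_zh_spec : Claim_equal_format_adopter_merged_deltas_zh := by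
  intro merged _
  exact pv_main merged
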